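-- pv_equiv track=rewrite | github.com/kenanboracic4/AoC | Day 5/z11.py | prebroji_ukupno_svjeze_id_optimizirano
-- ===== SOURCE A (Python) =====
-- def spoji_raspore(rasponi):
--     """
--     Sortira raspone i spaja one koji se preklapaju ili dodiruju.
--     Ovo rješava problem prevelikih raspona jer radi samo s granicama.
--
--     Args:
--         rasponi (list): Popis parova (pocetak, kraj).
--
--     Returns:
--         list: Popis spojenih, nepreklapajućih raspona.
--     """
--     if not rasponi:
--         return []
--
--     # Sortiranje po početku raspona
--     rasponi.sort(key=lambda x: x[0])
--
--     spojeni = []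
--     trenutni_pocetak, trenutni_kraj = rasponi[0]
--
--     # Prolazimo kroz ostale raspone
--     for sljedeci_pocetak, sljedeci_kraj in rasponi[1:]:
--
--         # Ako se rasponi preklapaju ili dodiruju (kraj + 1 >= sljedeci_pocetak)
--         # Npr. (3, 5) i (6, 10) se dodiruju. (3, 5) i (5, 10) se preklapaju
--         if trenutni_kraj >= sljedeci_pocetak - 1:
--             # Spajanje: produžujemo trenutni kraj na maksimum oba kraja
--             trenutni_kraj = max(trenutni_kraj, sljedeci_kraj)
--         else:
--             # Ne preklapaju se, spremamo trenutni i započinjemo novi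
--             spojeni.append((trenutni_pocetak, trenutni_kraj))
--             trenutni_pocetak, trenutni_kraj = sljedeci_pocetak, sljedeci_kraj
--
--     # Dodajemo posljednji spojeni raspon
--     spojeni.append((trenutni_pocetak, trenutni_kraj))
--     return spojeni
--
-- def prebroji_ukupno_svjeze_id_optimizirano(ulazni_tekst):
--     """
--     Računa ukupan broj jedinstvenih svježih ID-ova koristeći spajanje intervala.
--     """
--
--     tekst_normaliziran = ulazni_tekst.replace('\r\n', '\n').replace('\r', '\n')
--     dijelovi = tekst_normaliziran.strip().split('\n\n')
--
--     if not dijelovi: return 0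
--
--     rasponi_linije = dijelovi[0].strip().split('\n')
--     svjezi_rasponi = []
--
--     # 1. Parsiranje raspona
--     for linija in rasponi_linije:
--         linija = linija.strip()
--         if not linija or '-' not in linija: continue
--
--         try:
--             pocetak, kraj = map(int, linija.split('-'))
--             # Normalizacija: uvijek (manji, veći)
--             svjezi_rasponi.append((min(pocetak, kraj), max(pocetak, kraj)))
--         except ValueError:
--             continue
--
--     # 2. Spajanje preklapajućih raspona
--     spojeni_rasponi = spoji_raspore(svjezi_rasponi)
--
--     # 3. Zbrajanje duljina spojenih raspona
--     ukupan_broj_svjezih = 0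
--     for pocetak, kraj in spojeni_rasponi:
--         # Broj ID-ova u rasponu [pocetak, kraj] je (kraj - pocetak + 1)
--         ukupan_broj_svjezih += (kraj - pocetak + 1)
--
--     return ukupan_broj_svjezih
-- ===== SOURCE B (Python) =====
-- def prebroji_ukupno_svjeze_id_optimizirano(ulazni_tekst):
--     """
--     Isti rezultat kao A, ali bez izgradnje liste spojenih raspona:
--     jedan prolaz po sortiranim rasponima s tekucim dosegom i zbrojem.
--     """
--     tekst_normaliziran = ulazni_tekst.replace('\r\n', '\n').replace('\r', '\n')
--     dijelovi = tekst_normaliziran.strip().split('\n\n')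
--
--     if not dijelovi: return 0
--
--     rasponi_linije = dijelovi[0].strip().split('\n')
--     svjezi_rasponi = []
--
--     for linija in rasponi_linije:
--         linija = linija.strip()
--         if not linija or '-' not in linija: continue
--         try:
--             pocetak, kraj = map(int, linija.split('-'))
--             svjezi_rasponi.append((min(pocetak, kraj), max(pocetak, kraj)))
--         except ValueError:
--             continue
--
--     svjezi_rasponi.sort(key=lambda x: x[0])
--
--     ukupno = 0
--     doseg = None  # najdalji vec izbrojani ID
--     for p, k in svjezi_rasponi:
--         if doseg is None or p > doseg:
--             ukupno += k - p + 1
--             doseg = k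
--         elif k > doseg:
--             ukupno += k - doseg
--             doseg = k
--     return ukupno
-- ===== Notes on version B (the rewrite author's own statement) =====
-- stated objective: simpler
-- what changed: Instead of merging sorted intervals into a list of disjoint ranges and then summing their lengths in a second loop, B makes one pass over the sorted ranges keeping only a furthest-covered-ID bound and a running total, adding each range's not-yet-covered part.
import Mathlib
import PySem

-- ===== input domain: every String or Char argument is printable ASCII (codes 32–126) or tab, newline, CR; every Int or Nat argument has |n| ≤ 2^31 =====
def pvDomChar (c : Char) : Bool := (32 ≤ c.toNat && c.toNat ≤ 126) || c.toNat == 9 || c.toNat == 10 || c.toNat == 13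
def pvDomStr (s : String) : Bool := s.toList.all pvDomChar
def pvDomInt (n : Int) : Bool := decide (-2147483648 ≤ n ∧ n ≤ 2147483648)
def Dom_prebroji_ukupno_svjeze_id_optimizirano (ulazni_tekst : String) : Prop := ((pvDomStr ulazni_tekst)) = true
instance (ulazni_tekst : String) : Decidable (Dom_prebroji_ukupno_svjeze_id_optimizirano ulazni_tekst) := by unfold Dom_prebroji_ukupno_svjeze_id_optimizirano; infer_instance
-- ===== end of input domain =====

-- B replaces A's merge-intervals-then-sum-lengths by a single pass over the sorted
-- ranges that keeps only a furthest-covered-ID bound and a running total (objective: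
-- simpler — no merged-interval list is built). A sorts a local list in place; no
-- caller-visible mutation. Parsing is kept byte-for-byte identical in both versions.

-- ===== PORT A =====
-- shared parsing (identical lines of both Pythons): CRLF-normalize, strip, first
-- '\n\n'-block, per line: strip, skip blank / no '-', split on '-', two int()s, (min,max)
def pvParseLines (linije : List (List Char)) : List (Int × Int) :=
  linije.foldl (fun acc linija0 =>
    let linija := PySem.Chars.strip linija0
    if linija = [] ∨ PySem.Chars.isIn ['-'] linija = false then acc
    else
      match PySem.Chars.splitOn linija ['-'] with
      | [a, b] =>
        match PySem.Int.ofChars? a, PySem.Int.ofChars? b with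
        | some pocetak, some kraj =>
            acc ++ [(min pocetak kraj, max pocetak kraj)]
        | _, _ => acc   -- ValueError from int(): continue
      | _ => acc        -- wrong number of '-'-parts: unpacking ValueError, continue
    ) []

def pvSvjeziRasponi (ulazni_tekst : String) : List (Int × Int) :=
  let tekst_normaliziran :=
    PySem.Str.replace (PySem.Str.replace ulazni_tekst "\r\n" "\n") "\r" "\n"
  let dijelovi :=
    PySem.Chars.splitOn (PySem.Chars.strip tekst_normaliziran.toList) ['\n', '\n']
  match dijelovi with
  | [] => []            -- Python: 'if not dijelovi: return 0'
  | prvi :: _ => pvParseLines (PySem.Chars.splitOn (PySem.Chars.strip prvi) ['\n'])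

-- the body of A's merge loop (state: merged list so far, current start, current end)
def pvStepA (s : List (Int × Int) × Int × Int) (q : Int × Int) : List (Int × Int) × Int × Int :=
  if s.2.2 ≥ q.1 - 1 then (s.1, s.2.1, max s.2.2 q.2)
  else (s.1 ++ [(s.2.1, s.2.2)], q.1, q.2)

-- A's helper spoji_raspore: sort by start, merge touching/overlapping ranges
def pvSpojiRaspore (rasponi : List (Int × Int)) : List (Int × Int) :=
  if rasponi = [] then []
  else
    match PySem.List.sorted rasponi (fun x => x.1) false with
    | [] => []          -- unreachable: sorted of a nonempty list is nonempty
    | (tp, tk) :: ostali =>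
      let st := ostali.foldl pvStepA (([] : List (Int × Int)), tp, tk)
      st.1 ++ [(st.2.1, st.2.2)]

def prebroji_ukupno_svjeze_id_optimizirano (ulazni_tekst : String) : Int :=
  let spojeni_rasponi := pvSpojiRaspore (pvSvjeziRasponi ulazni_tekst)
  spojeni_rasponi.foldl (fun acc x => acc + (x.2 - x.1 + 1)) 0

-- ===== PORT B =====
-- the body of B's loop (state: furthest counted ID, running total)
def pvStepB (st : Option Int × Int) (x : Int × Int) : Option Int × Int :=
  match st.1 with
  | none => ((some x.2 : Option Int), st.2 + (x.2 - x.1 + 1))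
  | some doseg =>
    if x.1 > doseg then (some x.2, st.2 + (x.2 - x.1 + 1))
    else if x.2 > doseg then (some x.2, st.2 + (x.2 - doseg))
    else (some doseg, st.2)

def prebroji_ukupno_svjeze_id_optimizirano_alt (ulazni_tekst : String) : Int :=
  let rasponi := pvSvjeziRasponi ulazni_tekst
  let sortirano := PySem.List.sorted rasponi (fun x => x.1) false
  (sortirano.foldl pvStepB ((none : Option Int), (0 : Int))).2

-- ===== PRECONDITION & SPEC =====
def Spec_prebroji_ukupno_svjeze_id_optimizirano (ulazni_tekst : String) (out : Int) : Prop := out = prebroji_ukupno_svjeze_id_optimizirano_alt ulazni_tekst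
instance (ulazni_tekst : String) (out : Int) : Decidable (Spec_prebroji_ukupno_svjeze_id_optimizirano ulazni_tekst out) := by unfold Spec_prebroji_ukupno_svjeze_id_optimizirano; infer_instance

-- ===== CLAIM (what is proved, stated in full; the proofs are below) =====
def Claim_equal_prebroji_ukupno_svjeze_id_optimizirano : Prop := ∀ (ulazni_tekst : String), Dom_prebroji_ukupno_svjeze_id_optimizirano ulazni_tekst → Spec_prebroji_ukupno_svjeze_id_optimizirano ulazni_tekst (prebroji_ukupno_svjeze_id_optimizirano ulazni_tekst)

-- ===== LEMMAS AND PROOFS =====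

def pvSumLen (xs : List (Int × Int)) : Int := (xs.map (fun x => x.2 - x.1 + 1)).sum

-- every parsed range is normalized: start ≤ end
lemma pvParseLines_norm (linije : List (List Char)) :
    ∀ x ∈ pvParseLines linije, x.1 ≤ x.2 := by
  unfold pvParseLines
  suffices h : ∀ (acc : List (Int × Int)), (∀ x ∈ acc, x.1 ≤ x.2) →
      ∀ x ∈ linije.foldl (fun acc linija0 =>
        let linija := PySem.Chars.strip linija0
        if linija = [] ∨ PySem.Chars.isIn ['-'] linija = false then acc
        else
          match PySem.Chars.splitOn linija ['-'] with
          | [a, b] =>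
            match PySem.Int.ofChars? a, PySem.Int.ofChars? b with
            | some pocetak, some kraj =>
                acc ++ [(min pocetak kraj, max pocetak kraj)]
            | _, _ => acc
          | _ => acc) acc, x.1 ≤ x.2 by
    exact h [] (by simp)
  induction linije with
  | nil => intro acc hacc x hx; exact hacc x hx
  | cons l rest ih =>
    intro acc hacc x hx
    refine ih _ ?_ x hx
    intro y hy
    simp only at hy
    split at hy
    · exact hacc y hy
    · split at hy
      · split at hy
        · rcases List.mem_append.1 hy with h | h
          · exact hacc y h
          · simp only [List.mem_singleton] at h
            subst h; exact min_le_max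
        · exact hacc y hy
      · exact hacc y hy

lemma pvSvjezi_norm (s : String) : ∀ x ∈ pvSvjeziRasponi s, x.1 ≤ x.2 := by
  unfold pvSvjeziRasponi
  intro x hx
  dsimp only at hx
  split at hx
  · simp at hx
  · exact pvParseLines_norm _ x hx

-- the loop invariant tying B's (reach, total) to A's (merged list, current range)
lemma pv_fold_inv (L : List (Int × Int)) (hL : ∀ x ∈ L, x.1 ≤ x.2) :
    ∀ (acc : List (Int × Int)) (cp ck tot : Int), tot = pvSumLen acc + (ck - cp + 1) →
    L.foldl pvStepB (some ck, tot) =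
      (some (L.foldl pvStepA (acc, cp, ck)).2.2,
       pvSumLen (L.foldl pvStepA (acc, cp, ck)).1 +
         ((L.foldl pvStepA (acc, cp, ck)).2.2 - (L.foldl pvStepA (acc, cp, ck)).2.1 + 1)) := by
  induction L with
  | nil => intro acc cp ck tot htot; simpa using htot
  | cons x rest ih =>
    intro acc cp ck tot htot
    have hx : x.1 ≤ x.2 := hL x (by simp)
    have hrest : ∀ y ∈ rest, y.1 ≤ y.2 := fun y hy => hL y (by simp [hy])
    simp only [List.foldl_cons]
    by_cases h1 : x.1 > ck
    · by_cases h2 : ck ≥ x.1 - 1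
      · -- touching: x.1 = ck + 1, A merges, B adds the full new length
        have hk : max ck x.2 = x.2 := by omega
        have hstepA : pvStepA (acc, cp, ck) x = (acc, cp, x.2) := by
          simp [pvStepA, h2, hk]
        have hstepB : pvStepB (some ck, tot) x = (some x.2, tot + (x.2 - x.1 + 1)) := by
          simp [pvStepB, h1]
        rw [hstepA, hstepB]
        exact ih hrest acc cp x.2 _ (by omega)
      · -- real gap: A flushes the current range, B adds the full new length
        have hstepA : pvStepA (acc, cp, ck) x = (acc ++ [(cp, ck)], x.1, x.2) := by
          simp [pvStepA]; omega
        have hstepB : pvStepB (some ck, tot) x = (some x.2, tot + (x.2 - x.1 + 1)) := by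
          simp [pvStepB, h1]
        rw [hstepA, hstepB]
        refine ih hrest _ x.1 x.2 _ ?_
        simp only [pvSumLen, List.map_append, List.sum_append, List.map_cons,
          List.map_nil, List.sum_cons, List.sum_nil] at *
        omega
    · -- overlap: A merges; B adds only the uncovered part (possibly nothing)
      have h2 : ck ≥ x.1 - 1 := by omega
      by_cases h3 : x.2 > ck
      · have hstepA : pvStepA (acc, cp, ck) x = (acc, cp, x.2) := by
          have hk : max ck x.2 = x.2 := by omega
          simp [pvStepA, h2, hk]
        have hstepB : pvStepB (some ck, tot) x = (some x.2, tot + (x.2 - ck)) := by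
          simp [pvStepB, h1, h3]
        rw [hstepA, hstepB]
        exact ih hrest acc cp x.2 _ (by omega)
      · have hstepA : pvStepA (acc, cp, ck) x = (acc, cp, ck) := by
          have hk : max ck x.2 = ck := by omega
          simp [pvStepA, h2, hk]
        have hstepB : pvStepB (some ck, tot) x = (some ck, tot) := by
          simp [pvStepB, h1, h3]
        rw [hstepA, hstepB]
        exact ih hrest acc cp ck tot htot

-- A's final summation loop is pvSumLen
lemma pv_sum_eq (xs : List (Int × Int)) :
    xs.foldl (fun acc x => acc + (x.2 - x.1 + 1)) 0 = pvSumLen xs := by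
  rw [PySem.List.foldl_add xs (fun x => x.2 - x.1 + 1) 0]
  simp [pvSumLen]

-- the whole computation after parsing, for any normalized range list
lemma pv_main (R : List (Int × Int)) (hnorm : ∀ x ∈ R, x.1 ≤ x.2) :
    (pvSpojiRaspore R).foldl (fun acc x => acc + (x.2 - x.1 + 1)) 0 =
      ((PySem.List.sorted R (fun x => x.1) false).foldl pvStepB
        ((none : Option Int), (0 : Int))).2 := by
  by_cases hnil : R = []
  · rw [hnil, (PySem.List.sorted_eq_nil_iff ([] : List (Int × Int)) (fun x => x.1) false).2 rfl]
    simp [pvSpojiRaspore]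
  · have hsnil : PySem.List.sorted R (fun x => x.1) false ≠ [] := by
      simp [PySem.List.sorted_eq_nil_iff, hnil]
    obtain ⟨p, rest, hs⟩ : ∃ p rest, PySem.List.sorted R (fun x => x.1) false = p :: rest :=
      List.exists_cons_of_ne_nil hsnil
    have hrest : ∀ x ∈ rest, x.1 ≤ x.2 := by
      intro x hx
      refine hnorm x ?_
      exact (PySem.List.sorted_perm R (fun x => x.1) false).mem_iff.1
        (by rw [hs]; exact List.mem_cons_of_mem _ hx)
    have hA : pvSpojiRaspore R =
        (rest.foldl pvStepA ([], p.1, p.2)).1 ++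
          [((rest.foldl pvStepA ([], p.1, p.2)).2.1, (rest.foldl pvStepA ([], p.1, p.2)).2.2)] := by
      unfold pvSpojiRaspore
      rw [if_neg hnil]
      rw [hs]
    rw [hA, hs, List.foldl_cons]
    have hB1 : pvStepB ((none : Option Int), (0 : Int)) p = (some p.2, 0 + (p.2 - p.1 + 1)) := by
      simp [pvStepB]
    rw [hB1]
    rw [pv_fold_inv rest hrest [] p.1 p.2 (0 + (p.2 - p.1 + 1)) (by simp [pvSumLen])]
    rw [pv_sum_eq]
    simp [pvSumLen]

-- ===== VERDICT (by name: the statement is the Claim_ definition above) =====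
theorem prebroji_ukupno_svjeze_id_optimizirano_spec : Claim_equal_prebroji_ukupno_svjeze_id_optimizirano := by
  intro s _
  unfold Spec_prebroji_ukupno_svjeze_id_optimizirano
  unfold prebroji_ukupno_svjeze_id_optimizirano prebroji_ukupno_svjeze_id_optimizirano_alt
  dsimp only
  have hnorm := pvSvjezi_norm s
  generalize hgen : pvSvjeziRasponi s = R
  rw [hgen] at hnorm
  exact pv_main R hnorm
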